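-- pv_equiv track=rewrite | github.com/wangDxia/SimGrader | Grade/GradingWithSim.py | find_code
-- ===== SOURCE A (Python) =====
-- def find_code(score, data):
--     correct = []
--     incorrect = []
--
--     for i in range(len(data["code_result"])):
--         if data["code_result"][i] == 0:
--             correct.append(i)
--         else:
--             incorrect.append(i)
--     cor_s = []
--     for i in range(len(correct)):
--         cor_s.append(score[correct[i]])
--     max_cor = correct[cor_s.index(max(cor_s))]
--     min_cor = correct[cor_s.index(min(cor_s))]
--     incor_s = []
--     for i in range(len(incorrect)):
--         incor_s.append(score[incorrect[i]])
--     max_incor = incorrect[incor_s.index(max(incor_s))]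
--     min_incor = incorrect[incor_s.index(min(incor_s))]
--
--     return [max_cor, min_cor, max_incor, min_incor]
-- ===== SOURCE B (Python) =====
-- def find_code(score, data):
--     code_result = data["code_result"]
--     max_c = min_c = max_i = min_i = None  # (index, value) trackers
--     for i in range(len(code_result)):
--         v = score[i]
--         if code_result[i] == 0:
--             if max_c is None or v > max_c[1]:
--                 max_c = (i, v)
--             if min_c is None or v < min_c[1]:
--                 min_c = (i, v)
--         else:
--             if max_i is None or v > max_i[1]:
--                 max_i = (i, v)
--             if min_i is None or v < min_i[1]:
--                 min_i = (i, v)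
--     if max_c is None or max_i is None:
--         raise ValueError("empty group")
--     return [max_c[0], min_c[0], max_i[0], min_i[0]]
-- ===== Notes on version B (the rewrite author's own statement) =====
-- stated objective: faster
-- what changed: Replaces A's four intermediate lists plus max/min followed by list.index rescans with a single pass that maintains four (index,value) trackers updated by strict comparisons (preserving first-occurrence tie-breaking).
import Mathlib
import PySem

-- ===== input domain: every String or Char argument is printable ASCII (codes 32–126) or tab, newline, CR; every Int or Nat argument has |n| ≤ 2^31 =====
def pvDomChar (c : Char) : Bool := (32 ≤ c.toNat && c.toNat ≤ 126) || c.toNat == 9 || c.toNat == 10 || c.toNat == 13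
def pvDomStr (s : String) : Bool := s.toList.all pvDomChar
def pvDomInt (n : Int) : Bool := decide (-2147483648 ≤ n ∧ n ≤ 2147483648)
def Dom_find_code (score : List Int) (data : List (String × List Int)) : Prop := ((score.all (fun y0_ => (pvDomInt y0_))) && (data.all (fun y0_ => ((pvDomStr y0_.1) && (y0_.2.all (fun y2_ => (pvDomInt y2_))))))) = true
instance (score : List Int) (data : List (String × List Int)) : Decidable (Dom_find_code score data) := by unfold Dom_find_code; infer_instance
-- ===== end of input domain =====

-- B replaces A's four intermediate lists and max/min + list.index rescans by one pass with four (index,value) trackers; equivalence of return values proved on Pre_ (key present, score long enough, both groups nonempty — exactly where A returns).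

-- ===== PORT A =====
-- helper for 'lst[s.index(max(s))]': m = max(s)/min(s) (none = ValueError on empty, excluded by Pre_);
-- the 0 defaults are never reached inside Pre_ (index of a present value, in-range lookup)
def pickA (idxs s : List Int) (m : Option Int) : Int :=
  match m with
  | none => 0
  | some v =>
    match PySem.List.index? s v with
    | none => 0
    | some k => PySem.List.pyGetD idxs (k : Int) 0

def find_code (score : List Int) (data : List (String × List Int)) : List Int :=
  match (PySem.Dict.mk data).get? "code_result" with
  | none => []  -- KeyError, excluded by Pre_
  | some cr =>
    -- for i in range(len(cr)): append i to correct/incorrect (i is always in range, so default 0 unreached)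
    let ci := (PySem.List.pyRange 0 (PySem.List.len cr) 1).foldl
      (fun (acc : List Int × List Int) i =>
        if PySem.List.pyGetD cr i 0 == 0 then (acc.1 ++ [i], acc.2) else (acc.1, acc.2 ++ [i])) ([], [])
    let correct := ci.1
    let incorrect := ci.2
    -- cor_s.append(score[correct[i]]) ; default 0 = IndexError, excluded by Pre_
    let cor_s := (PySem.List.pyRange 0 (PySem.List.len correct) 1).foldl
      (fun acc i => acc ++ [PySem.List.pyGetD score (PySem.List.pyGetD correct i 0) 0]) []
    let incor_s := (PySem.List.pyRange 0 (PySem.List.len incorrect) 1).foldl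
      (fun acc i => acc ++ [PySem.List.pyGetD score (PySem.List.pyGetD incorrect i 0) 0]) []
    [pickA correct cor_s (PySem.List.max? cor_s (fun y => y)),
     pickA correct cor_s (PySem.List.min? cor_s (fun y => y)),
     pickA incorrect incor_s (PySem.List.max? incor_s (fun y => y)),
     pickA incorrect incor_s (PySem.List.min? incor_s (fun y => y))]

-- ===== PORT B =====
def updMax (t : Option (Int × Int)) (i v : Int) : Option (Int × Int) :=
  match t with
  | none => some (i, v)
  | some q => if v > q.2 then some (i, v) else some q

def updMin (t : Option (Int × Int)) (i v : Int) : Option (Int × Int) :=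
  match t with
  | none => some (i, v)
  | some q => if v < q.2 then some (i, v) else some q

def find_code_alt (score : List Int) (data : List (String × List Int)) : List Int :=
  match (PySem.Dict.mk data).get? "code_result" with
  | none => []  -- KeyError, excluded by Pre_
  | some cr =>
    -- single pass; v = score[i] (default 0 = IndexError, excluded by Pre_)
    let st := (PySem.List.pyRange 0 (PySem.List.len cr) 1).foldl
      (fun (st : Option (Int × Int) × Option (Int × Int) × Option (Int × Int) × Option (Int × Int)) i =>
        let v := PySem.List.pyGetD score i 0
        if PySem.List.pyGetD cr i 0 == 0 then
          (updMax st.1 i v, updMin st.2.1 i v, st.2.2.1, st.2.2.2)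
        else
          (st.1, st.2.1, updMax st.2.2.1 i v, updMin st.2.2.2 i v))
      (none, none, none, none)
    match st.1, st.2.1, st.2.2.1, st.2.2.2 with
    | some mc, some nc, some mi, some ni => [mc.1, nc.1, mi.1, ni.1]
    | _, _, _, _ => []  -- ValueError: empty group, excluded by Pre_

-- ===== PRECONDITION & SPEC =====
-- Pre_ excludes exactly the inputs where the Python A raises: missing "code_result" key (KeyError),
-- score shorter than code_result (IndexError), or a group with no element (max([]) ValueError).
def Pre_find_code (score : List Int) (data : List (String × List Int)) : Prop :=
  ((PySem.Dict.mk data).get? "code_result").isSome = true ∧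
  (((PySem.Dict.mk data).get? "code_result").getD []).length ≤ score.length ∧
  (0 : Int) ∈ ((PySem.Dict.mk data).get? "code_result").getD [] ∧
  ∃ x ∈ ((PySem.Dict.mk data).get? "code_result").getD [], x ≠ 0
instance (score : List Int) (data : List (String × List Int)) : Decidable (Pre_find_code score data) := by
  unfold Pre_find_code; infer_instance

def pvWitness_find_code : List Int × (List (String × List Int)) :=
  ([1, 5, 3], [("code_result", [0, 1, 0])])

def Spec_find_code (score : List Int) (data : List (String × List Int)) (out : List Int) : Prop := out = find_code_alt score data
instance (score : List Int) (data : List (String × List Int)) (out : List Int) : Decidable (Spec_find_code score data out) := by unfold Spec_find_code; infer_instance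

-- ===== CLAIM (what is proved, stated in full; the proofs are below) =====
def Claim_equal_find_code : Prop := ∀ (score : List Int) (data : List (String × List Int)), Dom_find_code score data → Pre_find_code score data → Spec_find_code score data (find_code score data)

-- ===== LEMMAS AND PROOFS =====

-- the generic strict-improvement step on (index, value) pairs: take the new pair iff it strictly beats the old
def pvStep (bt : Int → Int → Bool) (a p : Int × Int) : Int × Int := if bt p.2 a.2 then p else a

theorem pvStep_inv (bt : Int → Int → Bool) (hirr : ∀ x, bt x x = false)
    (h3 : ∀ x y z, bt x y = true → bt x z = false → bt y z = false) :
    ∀ (l : List (Int × Int)) (a : Int × Int), bt a.2 (l.foldl (pvStep bt) a).2 = false := by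
  intro l
  induction l with
  | nil => intro a; exact hirr a.2
  | cons p l ih =>
    intro a
    simp only [List.foldl_cons]
    by_cases hb : bt p.2 a.2 = true
    · rw [show pvStep bt a p = p from by simp [pvStep, hb]]
      exact h3 p.2 a.2 (l.foldl (pvStep bt) p).2 hb (ih p)
    · simp only [Bool.not_eq_true] at hb
      rw [show pvStep bt a p = a from by simp [pvStep, hb]]
      exact ih a

theorem pvArgfirst (bt : Int → Int → Bool) (hirr : ∀ x, bt x x = false)
    (h3 : ∀ x y z, bt x y = true → bt x z = false → bt y z = false)
    (hanti : ∀ x y, bt x y = false → bt y x = false → x = y) :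
    ∀ (l : List (Int × Int)) (a : Int × Int), ∃ k : ℕ,
      PySem.List.index? ((a :: l).map Prod.snd) ((l.foldl (pvStep bt) a).2) = some k ∧
      ((a :: l).map Prod.fst)[k]? = some ((l.foldl (pvStep bt) a).1) := by
  intro l
  induction l with
  | nil =>
    intro a
    exact ⟨0, by simp, by simp⟩
  | cons p l ih =>
    intro a
    simp only [List.foldl_cons]
    by_cases hb : bt p.2 a.2 = true
    · rw [show pvStep bt a p = p from by simp [pvStep, hb]]
      obtain ⟨k, hidx, hget⟩ := ih p
      have hne : a.2 ≠ (l.foldl (pvStep bt) p).2 := by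
        intro he
        have := pvStep_inv bt hirr h3 l p
        rw [← he] at this
        rw [hb] at this; exact Bool.true_eq_false.mp this
      refine ⟨k + 1, ?_, ?_⟩
      · rw [List.map_cons, PySem.List.index?_cons_of_ne _ hne, hidx]; rfl
      · simpa using hget
    · simp only [Bool.not_eq_true] at hb
      rw [show pvStep bt a p = a from by simp [pvStep, hb]]
      obtain ⟨k, hidx, hget⟩ := ih a
      set m := l.foldl (pvStep bt) a with hm
      have hinv : bt a.2 m.2 = false := pvStep_inv bt hirr h3 l a
      cases k with
      | zero =>
        -- first occurrence is the seed itself: head matches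
        have h2 : a.2 = m.2 := by
          obtain ⟨hk, hv, _⟩ := PySem.List.getElem_of_index?_eq_some hidx
          simpa using hv
        have h1 : a.1 = m.1 := by simpa using hget
        refine ⟨0, ?_, ?_⟩
        · rw [List.map_cons, ← h2, PySem.List.index?_cons_self]
        · simp [h1]
      | succ j =>
        have hne : a.2 ≠ m.2 := by
          obtain ⟨hk, hv, hfirst⟩ := PySem.List.getElem_of_index?_eq_some hidx
          have := hfirst 0 (Nat.succ_pos j)
          simpa using this
        have hidx' : PySem.List.index? (l.map Prod.snd) m.2 = some j := by
          rw [List.map_cons, PySem.List.index?_cons_of_ne _ hne] at hidx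
          cases h : PySem.List.index? (l.map Prod.snd) m.2 with
          | none => rw [h] at hidx; simp at hidx
          | some j' =>
            rw [h] at hidx
            simp only [Option.map_some, Option.some.injEq] at hidx
            exact congrArg some (by omega)
        have hnep : p.2 ≠ m.2 := by
          intro he
          have : a.2 = p.2 := hanti a.2 p.2 (he ▸ hinv) hb
          exact hne (this.trans he)
        refine ⟨j + 2, ?_, ?_⟩
        · rw [List.map_cons, PySem.List.index?_cons_of_ne _ hne, List.map_cons,
            PySem.List.index?_cons_of_ne _ hnep, hidx']
          rfl
        · have : (l.map Prod.fst)[j]? = some m.1 := by simpa using hget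
          simpa using this

-- the value component of the tracker fold is the running max/min of the values
theorem pvSnd_fold (op : Int → Int → Int) (bt : Int → Int → Bool)
    (hop : ∀ x y, op x y = if bt y x then y else x) :
    ∀ (l : List (Int × Int)) (a : Int × Int),
      (l.foldl (pvStep bt) a).2 = (l.map Prod.snd).foldl op a.2 := by
  intro l
  induction l with
  | nil => intro a; rfl
  | cons p l ih =>
    intro a
    simp only [List.foldl_cons, List.map_cons]
    rw [ih, hop]
    by_cases hb : bt p.2 a.2 = true
    · rw [show pvStep bt a p = p from by simp [pvStep, hb]]
      simp [hb]
    · simp only [Bool.not_eq_true] at hb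
      rw [show pvStep bt a p = a from by simp [pvStep, hb]]
      simp [hb]

-- A's 'lst[s.index(max(s))]' picks exactly the tracker fold's index
theorem pvGroup_pick (bt : Int → Int → Bool) (hirr : ∀ x, bt x x = false)
    (h3 : ∀ x y z, bt x y = true → bt x z = false → bt y z = false)
    (hanti : ∀ x y, bt x y = false → bt y x = false → x = y)
    (f : Int → Int) (a : Int) (t : List Int)
    (mv : Option Int)
    (hmv : mv = some (((t.map (fun i => (i, f i))).foldl (pvStep bt) (a, f a)).2)) :
    pickA (a :: t) ((a :: t).map f) mv
      = ((t.map (fun i => (i, f i))).foldl (pvStep bt) (a, f a)).1 := by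
  set l := t.map (fun i => (i, f i)) with hl
  set m := l.foldl (pvStep bt) (a, f a) with hm
  obtain ⟨k, hidx, hget⟩ := pvArgfirst bt hirr h3 hanti l (a, f a)
  rw [← hm] at hidx hget
  have hsnd : ((a, f a) :: l).map Prod.snd = (a :: t).map f := by
    simp [hl, List.map_map, Function.comp_def]
  have hfst : ((a, f a) :: l).map Prod.fst = a :: t := by
    simp [hl, List.map_map, Function.comp_def]
  rw [hsnd] at hidx
  rw [hfst] at hget
  simp only [pickA, hmv, hidx]
  rw [PySem.List.pyGetD_natCast]
  simp [List.getD, hget]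

-- the option-tracker fold started from none is the pair fold started from the first element
theorem pvFold_upd (u : Option (Int × Int) → Int → Int → Option (Int × Int)) (bt : Int → Int → Bool)
    (hs : ∀ r i v, u (some r) i v = some (pvStep bt r (i, v))) :
    ∀ (t : List Int) (f : Int → Int) (a : Int × Int),
      t.foldl (fun st i => u st i (f i)) (some a)
        = some ((t.map (fun i => (i, f i))).foldl (pvStep bt) a) := by
  intro t
  induction t with
  | nil => intro f a; rfl
  | cons i t ih =>
    intro f a
    simp only [List.foldl_cons, List.map_cons, hs]
    exact ih f _

theorem updMax_none (i v : Int) : updMax none i v = some (i, v) := rfl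
theorem updMin_none (i v : Int) : updMin none i v = some (i, v) := rfl

theorem updMax_some (r : Int × Int) (i v : Int) :
    updMax (some r) i v = some (pvStep (fun x y => decide (y < x)) r (i, v)) := by
  simp only [updMax, pvStep]
  by_cases h : r.2 < v <;> simp [h]

theorem updMin_some (r : Int × Int) (i v : Int) :
    updMin (some r) i v = some (pvStep (fun x y => decide (x < y)) r (i, v)) := by
  simp only [updMin, pvStep]
  by_cases h : v < r.2 <;> simp [h]

-- splitting A's two-list building fold
theorem pvSplit2 (p : Int → Bool) (l : List Int) (c ic : List Int) :
    l.foldl (fun (acc : List Int × List Int) i =>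
        if p i then (acc.1 ++ [i], acc.2) else (acc.1, acc.2 ++ [i])) (c, ic)
      = (c ++ l.filter p, ic ++ l.filter (fun i => !p i)) := by
  induction l generalizing c ic with
  | nil => simp
  | cons i l ih =>
    simp only [List.foldl_cons]
    by_cases h : p i = true
    · simp [h, ih]
    · simp only [Bool.not_eq_true] at h
      simp [h, ih]

-- splitting B's four-tracker fold
theorem pvSplit4 {σ₁ σ₂ σ₃ σ₄ : Type} (p : Int → Bool)
    (u₁ : σ₁ → Int → σ₁) (u₂ : σ₂ → Int → σ₂) (u₃ : σ₃ → Int → σ₃) (u₄ : σ₄ → Int → σ₄)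
    (l : List Int) (s₁ : σ₁) (s₂ : σ₂) (s₃ : σ₃) (s₄ : σ₄) :
    l.foldl (fun (st : σ₁ × σ₂ × σ₃ × σ₄) i =>
        if p i then (u₁ st.1 i, u₂ st.2.1 i, st.2.2.1, st.2.2.2)
        else (st.1, st.2.1, u₃ st.2.2.1 i, u₄ st.2.2.2 i)) (s₁, s₂, s₃, s₄)
      = ((l.filter p).foldl u₁ s₁, (l.filter p).foldl u₂ s₂,
         (l.filter (fun i => !p i)).foldl u₃ s₃, (l.filter (fun i => !p i)).foldl u₄ s₄) := by
  induction l generalizing s₁ s₂ s₃ s₄ with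
  | nil => simp
  | cons i l ih =>
    simp only [List.foldl_cons]
    by_cases h : p i = true
    · simp [h, ih]
    · simp only [Bool.not_eq_true] at h
      simp [h, ih]

theorem pvFilter_ne_nil (cr : List Int) (q : Int → Bool) (x : Int) (hx : x ∈ cr) (hq : q x = true) :
    (PySem.List.pyRange 0 (PySem.List.len cr) 1).filter (fun i => q (PySem.List.pyGetD cr i 0)) ≠ [] := by
  obtain ⟨k, hk, he⟩ := List.mem_iff_getElem.mp hx
  have hmem : (k : Int) ∈ PySem.List.pyRange 0 (PySem.List.len cr) 1 := by
    rw [PySem.List.mem_pyRange_one]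
    constructor
    · exact Int.natCast_nonneg k
    · simp only [PySem.List.len_eq]; exact_mod_cast hk
  have hp : q (PySem.List.pyGetD cr (k : Int) 0) = true := by
    rw [PySem.List.pyGetD_natCast]
    rw [List.getD_eq_getElem _ _ hk, he]
    exact hq
  exact List.ne_nil_of_mem (List.mem_filter.mpr ⟨hmem, hp⟩)

theorem pvMax_eq (x y : Int) : max x y = if decide (x < y) then y else x := by
  rcases lt_or_ge x y with h | h
  · rw [if_pos (by simpa using h), max_eq_right h.le]
  · rw [if_neg (by simpa using not_lt.mpr h), max_eq_left h]

theorem pvMin_eq (x y : Int) : min x y = if decide (y < x) then y else x := by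
  rcases lt_or_ge y x with h | h
  · rw [if_pos (by simpa using h), min_eq_right h.le]
  · rw [if_neg (by simpa using not_lt.mpr h), min_eq_left h]

-- ===== VERDICT (by name: the statement is the Claim_ definition above) =====
theorem find_code_spec : Claim_equal_find_code := by
  intro score data _ hpre
  obtain ⟨hsome, hlen, hmem0, x, hxmem, hxne⟩ := hpre
  unfold Spec_find_code find_code find_code_alt
  cases hget : (PySem.Dict.mk data).get? "code_result" with
  | none => simp [hget] at hsome
  | some cr =>
    dsimp only
    rw [hget] at hmem0 hxmem
    simp only [Option.getD_some] at hmem0 hxmem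
    -- the common pieces
    set p : Int → Bool := fun i => PySem.List.pyGetD cr i 0 == 0 with hp
    set f : Int → Int := fun i => PySem.List.pyGetD score i 0 with hf
    set idxs := PySem.List.pyRange 0 (PySem.List.len cr) 1 with hidxs
    have hcor : idxs.filter p ≠ [] := by
      refine pvFilter_ne_nil cr (fun v => v == 0) 0 hmem0 (by simp)
    have hincor : idxs.filter (fun i => !p i) ≠ [] := by
      refine pvFilter_ne_nil cr (fun v => !(v == 0)) x hxmem (by simp [hxne])
    obtain ⟨a, t, hcons⟩ := List.exists_cons_of_ne_nil hcor
    obtain ⟨b, s, hcons'⟩ := List.exists_cons_of_ne_nil hincor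
    -- A side reductions
    rw [pvSplit2 p idxs [] []]
    simp only [List.nil_append]
    have hscores : ∀ (il : List Int),
        (PySem.List.pyRange 0 (PySem.List.len il) 1).foldl
          (fun acc i => acc ++ [PySem.List.pyGetD score (PySem.List.pyGetD il i 0) 0]) []
        = il.map f := by
      intro il
      rw [PySem.List.foldl_pyRange_zero_pyGetD il 0 (fun acc v => acc ++ [PySem.List.pyGetD score v 0]) []]
      rw [PySem.List.foldl_append_singleton_eq_map]
      simp [hf]
    rw [hscores (idxs.filter p), hscores (idxs.filter (fun i => !p i))]
    -- B side reductions
    rw [pvSplit4 p (fun st i => updMax st i (f i)) (fun st i => updMin st i (f i))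
        (fun st i => updMax st i (f i)) (fun st i => updMin st i (f i)) idxs none none none none]
    rw [hcons, hcons']
    simp only [List.foldl_cons, updMax_none, updMin_none]
    rw [pvFold_upd _ _ updMax_some t f (a, f a), pvFold_upd _ _ updMin_some t f (a, f a),
        pvFold_upd _ _ updMax_some s f (b, f b), pvFold_upd _ _ updMin_some s f (b, f b)]
    -- combine
    have hirrM : ∀ (x : Int), (fun x y => decide (y < x)) x x = false := by intro x; simp
    have h3M : ∀ (x y z : Int), decide (y < x) = true → decide (z < x) = false → decide (z < y) = false := by
      intro x y z h1 h2; simp at h1 h2 ⊢; omega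
    have hantiM : ∀ (x y : Int), decide (y < x) = false → decide (x < y) = false → x = y := by
      intro x y h1 h2; simp at h1 h2; omega
    have hirrm : ∀ (x : Int), (fun x y => decide (x < y)) x x = false := by intro x; simp
    have h3m : ∀ (x y z : Int), decide (x < y) = true → decide (x < z) = false → decide (y < z) = false := by
      intro x y z h1 h2; simp at h1 h2 ⊢; omega
    have hantim : ∀ (x y : Int), decide (x < y) = false → decide (y < x) = false → x = y := by
      intro x y h1 h2; simp at h1 h2; omega
    have hmaxv : ∀ (c : Int) (u : List Int),
        PySem.List.max? ((c :: u).map f) (fun y => y)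
          = some (((u.map (fun i => (i, f i))).foldl (pvStep (fun x y => decide (y < x))) (c, f c)).2) := by
      intro c u
      rw [List.map_cons, PySem.List.max?_id_cons]
      rw [pvSnd_fold max (fun x y => decide (y < x)) pvMax_eq]
      simp [List.map_map, Function.comp_def]
    have hminv : ∀ (c : Int) (u : List Int),
        PySem.List.min? ((c :: u).map f) (fun y => y)
          = some (((u.map (fun i => (i, f i))).foldl (pvStep (fun x y => decide (x < y))) (c, f c)).2) := by
      intro c u
      rw [List.map_cons, PySem.List.min?_id_cons]
      rw [pvSnd_fold min (fun x y => decide (x < y)) pvMin_eq]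
      simp [List.map_map, Function.comp_def]
    rw [pvGroup_pick _ hirrM h3M hantiM f a t _ (hmaxv a t),
        pvGroup_pick _ hirrm h3m hantim f a t _ (hminv a t),
        pvGroup_pick _ hirrM h3M hantiM f b s _ (hmaxv b s),
        pvGroup_pick _ hirrm h3m hantim f b s _ (hminv b s)]
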